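-- pv_equiv track=rewrite | github.com/gratgrut/Tucil-2-Kriptokoding | vigenere_extended.py | autoKey
-- ===== SOURCE A (Python) =====
-- def autoKey(text, key):
--     key = list(key.upper())
--     if len(text) == len(key):
--         return key
--     else:
--         for i in range(len(text) - len(key)):
--             key.append(key[i % len(key)])
--     return ''.join(key)
-- ===== SOURCE B (Python) =====
-- def autoKey(text, key):
--     key_upper = key.upper()
--     target = max(len(text), len(key))
--     reps = -(-target // len(key))
--     return (key_upper * reps)[:target]
-- ===== Notes on version B (the rewrite author's own statement) =====
-- stated objective: simpler
-- what changed: Replaces the character-by-character append loop with a closed-form string repetition and slice ((key.upper()*ceil(target/len(key)))[:target] with target = max(len(text), len(key))); Pre_ excludes equal-length inputs, where A returns a list of characters instead of a string, and the empty-key inputs where A raises ZeroDivisionError (B raises it too, at the ceiling division).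
-- outside the precondition, e.g. on autoKey('ab', 'cd'): A returns ['C', 'D'], B returns 'CD'; on autoKey('', ''): A returns [], B raises ZeroDivisionError
import Mathlib
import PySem

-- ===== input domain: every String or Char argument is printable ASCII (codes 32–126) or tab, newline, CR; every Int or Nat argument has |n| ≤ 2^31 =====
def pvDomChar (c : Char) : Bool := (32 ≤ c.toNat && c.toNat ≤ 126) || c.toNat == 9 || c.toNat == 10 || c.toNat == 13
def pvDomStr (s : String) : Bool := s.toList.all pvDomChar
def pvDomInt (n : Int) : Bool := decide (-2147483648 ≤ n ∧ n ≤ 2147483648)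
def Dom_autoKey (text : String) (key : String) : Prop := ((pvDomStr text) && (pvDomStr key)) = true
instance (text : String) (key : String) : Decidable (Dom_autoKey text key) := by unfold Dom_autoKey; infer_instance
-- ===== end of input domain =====

-- B replaces A's per-character append loop with a closed-form repetition-and-slice of the
-- uppercased key; Pre_ excludes equal-length inputs (Python A returns a list of characters
-- there, not a string) and empty-key inputs (A raises ZeroDivisionError; so does B).


-- ===== PORT A =====
def autoKey (text : String) (key : String) : String :=
  let key0 := (PySem.Str.upper key).toList        -- key = list(key.upper())
  if PySem.Str.len text = (key0.length : Int) then
    -- Python returns the char LIST here (not a str; outside Pre_); rendered as its chars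
    String.ofList key0
  else
    -- for i in range(len(text) - len(key)): key.append(key[i % len(key)])
    String.ofList ((PySem.List.pyRange 0 (PySem.Str.len text - (key0.length : Int)) 1).foldl
      (fun k i => k ++ [PySem.List.pyGetD k (PySem.Int.mod i (k.length : Int)) ' ']) key0)

-- ===== PORT B =====
def autoKey_alt (text : String) (key : String) : String :=
  let ku := (PySem.Str.upper key).toList
  let target := max (PySem.Str.len text) (PySem.Str.len key)
  let reps := -(PySem.Int.floordiv (-target) (PySem.Str.len key))
  String.ofList (PySem.List.slice (PySem.List.pyRepeat ku reps) none (some target))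

-- ===== PRECONDITION & SPEC =====
-- Pre_ excludes (a) equal-length text/key, where A returns a list of characters instead of a
-- string, and (b) empty key with nonempty text, where A raises ZeroDivisionError.
def Pre_autoKey (text : String) (key : String) : Prop :=
  text.toList.length ≠ key.toList.length ∧ key.toList ≠ []
instance (text : String) (key : String) : Decidable (Pre_autoKey text key) := by
  unfold Pre_autoKey; infer_instance
def pvWitness_autoKey : String × String := ("HELLO WORLD", "ab")

def Spec_autoKey (text : String) (key : String) (out : String) : Prop := out = autoKey_alt text key
instance (text : String) (key : String) (out : String) : Decidable (Spec_autoKey text key out) := by unfold Spec_autoKey; infer_instance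

-- ===== CLAIM (what is proved, stated in full; the proofs are below) =====
def Claim_equal_autoKey : Prop := ∀ (text : String) (key : String), Dom_autoKey text key → Pre_autoKey text key → Spec_autoKey text key (autoKey text key)

-- ===== LEMMAS AND PROOFS =====

/-- The periodic extension of `L` to `n` characters. -/
def keyExt (L : List Char) (n : Nat) : List Char :=
  (List.range n).map (fun j => L.getD (j % L.length) ' ')

theorem length_keyExt (L : List Char) (n : Nat) : (keyExt L n).length = n := by
  simp [keyExt]

theorem keyExt_self (L : List Char) : keyExt L L.length = L := by
  apply List.ext_getElem (by simp [keyExt])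
  intro i h1 h2
  simp only [keyExt, List.getElem_map, List.getElem_range]
  rw [Nat.mod_eq_of_lt (by simpa [keyExt] using h1), List.getD_eq_getElem]

theorem keyExt_add (L : List Char) (m : Nat) :
    keyExt L (L.length + m) = L ++ keyExt L m := by
  simp only [keyExt, List.range_add, List.map_append, List.map_map]
  congr 1
  · simpa [keyExt] using keyExt_self L
  · exact List.map_congr_left (fun j _ => by simp [Nat.add_mod_left])

theorem take_keyExt (L : List Char) (m n : Nat) :
    (keyExt L n).take m = keyExt L (min m n) := by
  simp [keyExt, ← List.map_take, List.take_range]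

theorem pyRepeat_eq_keyExt (L : List Char) (r : Nat) :
    PySem.List.pyRepeat L (r : Int) = keyExt L (r * L.length) := by
  induction r with
  | zero => simp [PySem.List.pyRepeat, keyExt]
  | succ r ih =>
      have : (((r : Int) + 1)).toNat = r + 1 := by omega
      simp only [PySem.List.pyRepeat, Nat.cast_add, Nat.cast_one, this,
        List.replicate_succ, List.flatten_cons]
      have := keyExt_add L (r * L.length)
      rw [show (r + 1) * L.length = L.length + r * L.length by ring, this]
      have hih : (List.replicate r L).flatten = keyExt L (r * L.length) := by
        simpa [PySem.List.pyRepeat] using ih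
      rw [hih]

/-- A's append loop from a nonempty state `L` builds exactly the periodic extension. -/
theorem foldA (L : List Char) (hL : L ≠ []) (m : Nat) :
    (PySem.List.pyRange 0 (m : Int) 1).foldl
      (fun k i => k ++ [PySem.List.pyGetD k (PySem.Int.mod i (k.length : Int)) ' ']) L
      = keyExt L (L.length + m) := by
  have hk : 0 < L.length := List.length_pos_iff.mpr hL
  induction m with
  | zero =>
      rw [PySem.List.pyRange_one_eq_nil (by omega)]
      simpa using (keyExt_self L).symm
  | succ m ih =>
      rw [show ((m + 1 : Nat) : Int) = (m : Int) + 1 by push_cast; ring,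
        PySem.List.pyRange_one_succ_right (by positivity), List.foldl_append, ih]
      simp only [List.foldl_cons, List.foldl_nil, length_keyExt]
      rw [PySem.Int.mod_natCast m (L.length + m), Nat.mod_eq_of_lt (by omega),
        PySem.List.pyGetD_natCast]
      have hget : (keyExt L (L.length + m)).getD m ' ' = L.getD (m % L.length) ' ' := by
        simpa [keyExt] using PySem.List.getD_map_range
          (fun j => L.getD (j % L.length) ' ') (L.length + m) m ' ' (by omega)
      rw [hget, show L.length + (m + 1) = (L.length + m) + 1 by ring]
      simp [keyExt, List.range_succ, Nat.add_mod_left]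

-- ===== VERDICT (by name: the statement is the Claim_ definition above) =====
theorem autoKey_spec : Claim_equal_autoKey := by
  intro text key _ hpre
  obtain ⟨hne, hkey⟩ := hpre
  unfold Spec_autoKey autoKey autoKey_alt
  dsimp only
  set L := (PySem.Str.upper key).toList with hLdef
  have hlen : L.length = key.toList.length := by
    simp [hLdef, PySem.Str.upper, PySem.Chars.upper]
  have hLne : L ≠ [] := by
    intro h; apply hkey; rw [← List.length_eq_zero_iff, ← hlen, h]; rfl
  have hk : 0 < L.length := List.length_pos_iff.mpr hLne
  set t := text.toList.length with htdef
  have hlt : PySem.Str.len text = (t : Int) := by simp [PySem.Str.len_eq, htdef]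
  have hlk : PySem.Str.len key = (L.length : Int) := by simp [PySem.Str.len_eq, hlen]
  have hif : ¬ (PySem.Str.len text = (L.length : Int)) := by
    rw [hlt, hlen]; exact_mod_cast (by exact_mod_cast hne)
  rw [if_neg hif, hlt, hlk]
  -- name B's repetition count and get its ceiling bounds
  set q := -(PySem.Int.floordiv (-(max (t : Int) (L.length : Int))) (L.length : Int)) with hq
  have hbounds := (PySem.Int.neg_floordiv_neg_eq_iff_of_pos
    (a := max (t : Int) (L.length : Int)) (b := (L.length : Int)) (q := q)
    (by exact_mod_cast hk)).mp hq.symm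
  have hq1 : 1 ≤ q := by nlinarith [hbounds.1, hbounds.2, le_max_right (t : Int) (L.length : Int)]
  have hqnat : q = ((q.toNat : Nat) : Int) := by omega
  have hB : PySem.List.slice (PySem.List.pyRepeat L q) none (some (max (t : Int) (L.length : Int)))
      = keyExt L (max t L.length) := by
    rw [hqnat, pyRepeat_eq_keyExt L]
    rw [PySem.List.slice_to (xs := keyExt L (q.toNat * L.length))
      (b := max (t : Int) (L.length : Int)) (by positivity), take_keyExt]
    congr 1
    have h2 := hbounds.2
    rw [hqnat] at h2
    have h3 : max t L.length ≤ q.toNat * L.length := by exact_mod_cast h2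
    omega
  rw [hB]
  rcases Nat.lt_or_ge t L.length with hcase | hcase
  · -- key longer than text: the loop range is empty, both sides are the full upped key
    rw [PySem.List.pyRange_one_eq_nil (by omega), List.foldl_nil]
    rw [Nat.max_eq_right (by omega), keyExt_self]
  · -- text longer: the loop runs t - L.length times
    have ht : (t : Int) - (L.length : Int) = ((t - L.length : Nat) : Int) := by omega
    rw [ht, foldA L hLne, Nat.max_eq_left (by omega), Nat.add_sub_cancel' hcase]
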